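-- pv_equiv track=rewrite | github.com/Caniro/algorithm | Programmers/level1_python/17681.py | solution
-- ===== SOURCE A (Python) =====
-- def to_map(n, arr):
--     world = []
--
--     for num in arr:
--         row = []
--         for i in range(n):
--             row.append(str(num % 2))
--             num //= 2
--         row.reverse()
--         world.append(row)
--
--     return world
--
-- def solution(n, arr1, arr2):
--     world1 = to_map(n, arr1)
--     world2 = to_map(n, arr2)
--     total_world = []
--
--     for row1, row2 in zip(world1, world2):
--         new_row = []
--         for row in zip(row1, row2):
--             new_row.append('#' if sum(map(int, row)) else ' ')
--         total_world.append(''.join(new_row))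
--
--     return total_world
-- ===== SOURCE B (Python) =====
-- def solution(n, arr1, arr2):
--     return [''.join('#' if (a | b) >> k & 1 else ' ' for k in range(n - 1, -1, -1))
--             for a, b in zip(arr1, arr2)]
-- ===== Notes on version B (the rewrite author's own statement) =====
-- stated objective: faster
-- what changed: B replaces A's per-number digit-list construction (repeated %2 // 2 appends into Python lists, list reverse, element-wise zip of two digit maps and sum-of-ints test per cell) by one integer OR per row and direct shift-and-mask bit reads building each row string in a single comprehension; same O(len(arr)*n) asymptotics, large constant-factor win (no intermediate digit lists or str/int conversions; measured ~6x).
import Mathlib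
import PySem

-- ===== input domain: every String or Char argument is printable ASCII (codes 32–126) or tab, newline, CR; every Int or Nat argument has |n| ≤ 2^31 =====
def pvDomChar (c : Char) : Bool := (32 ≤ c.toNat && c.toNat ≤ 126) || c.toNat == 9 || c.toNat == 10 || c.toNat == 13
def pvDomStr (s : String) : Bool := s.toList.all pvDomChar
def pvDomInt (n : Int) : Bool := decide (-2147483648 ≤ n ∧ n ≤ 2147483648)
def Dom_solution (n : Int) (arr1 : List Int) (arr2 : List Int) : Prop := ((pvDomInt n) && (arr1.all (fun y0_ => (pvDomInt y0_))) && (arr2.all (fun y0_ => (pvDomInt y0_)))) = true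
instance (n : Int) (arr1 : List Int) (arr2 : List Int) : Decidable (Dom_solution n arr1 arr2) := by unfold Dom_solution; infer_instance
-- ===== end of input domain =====

-- B reads each bit of (a | b) directly with shift-and-mask instead of A's per-number
-- digit-list construction (repeated %2 // 2 appends, reverse, zip of two digit maps,
-- sum-of-ints test); objective: faster by a constant factor (no intermediate digit lists).

-- ===== PORT A =====
-- port of to_map: the inner 'for i in range(n)' loop folds the state (row, num)
def to_map (n : Int) (arr : List Int) : List (List String) :=
  arr.foldl (fun world num =>
    world ++ [((PySem.List.pyRange 0 n).foldl
      (fun (st : List String × Int) _ =>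
        (st.1 ++ [PySem.Int.toStr (PySem.Int.mod st.2 2)], PySem.Int.floordiv st.2 2))
      ([], num)).1.reverse]) []

-- sum(map(int, row)) on the 2-tuple row: int() via PySem.Int.ofStr?; the digits are
-- always "0"/"1" here, so '.getD 0' never masks a ValueError (exact on this domain)
def solution (n : Int) (arr1 : List Int) (arr2 : List Int) : List String :=
  let world1 := to_map n arr1
  let world2 := to_map n arr2
  (world1.zip world2).foldl (fun total p =>
    total ++ [PySem.Str.join "" ((p.1.zip p.2).foldl (fun nr q =>
      nr ++ [if ([q.1, q.2].foldl (fun s t => s + (PySem.Int.ofStr? t).getD 0) 0) ≠ 0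
             then "#" else " "]) [])]) []

-- ===== PORT B =====
-- k ranges over n-1, …, 0, so k ≥ 0 and k.toNat is exact (Python '>>' by a Nat amount)
def solution_alt (n : Int) (arr1 : List Int) (arr2 : List Int) : List String :=
  (arr1.zip arr2).map (fun p =>
    PySem.Str.join "" ((PySem.List.pyRange (n - 1) (-1) (-1)).map (fun k =>
      if PySem.Int.band (PySem.Int.bor p.1 p.2 >>> k.toNat) 1 ≠ 0 then "#" else " ")))

-- ===== PRECONDITION & SPEC =====
def Spec_solution (n : Int) (arr1 : List Int) (arr2 : List Int) (out : List String) : Prop := out = solution_alt n arr1 arr2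
instance (n : Int) (arr1 : List Int) (arr2 : List Int) (out : List String) : Decidable (Spec_solution n arr1 arr2 out) := by unfold Spec_solution; infer_instance

-- ===== CLAIM (what is proved, stated in full; the proofs are below) =====
def Claim_equal_solution : Prop := ∀ (n : Int) (arr1 : List Int) (arr2 : List Int), Dom_solution n arr1 arr2 → Spec_solution n arr1 arr2 (solution n arr1 arr2)

-- ===== LEMMAS AND PROOFS =====

-- generic: append-only foldl is a map
theorem pv_foldl_append_map {α β : Type} (f : α → β) :
    ∀ (l : List α) (acc : List β),
      l.foldl (fun a x => a ++ [f x]) acc = acc ++ l.map f := by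
  intro l
  induction l with
  | nil => simp
  | cons x t ih => intro acc; simp [List.foldl, ih]

-- the LSB-first digit list A builds for one number
def rowA : Nat → Int → List String
  | 0, _ => []
  | m + 1, x => PySem.Int.toStr (PySem.Int.mod x 2) :: rowA m (PySem.Int.floordiv x 2)

theorem rowA_length : ∀ (m : Nat) (x : Int), (rowA m x).length = m := by
  intro m
  induction m with
  | zero => intro x; rfl
  | succ k ih => intro x; simp [rowA, ih]

-- the inner range(n) fold ignores the range element and builds rowA
theorem pv_fold_rowA :
    ∀ (l : List Int) (acc : List String) (x : Int),
      (l.foldl (fun (st : List String × Int) _ =>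
          (st.1 ++ [PySem.Int.toStr (PySem.Int.mod st.2 2)], PySem.Int.floordiv st.2 2))
        (acc, x)).1 = acc ++ rowA l.length x := by
  intro l
  induction l with
  | nil => intro acc x; simp [rowA]
  | cons h t ih => intro acc x; simp only [List.foldl, List.length_cons, rowA, ih]; simp

theorem pyRange_len (n : Int) : PySem.List.pyRange 0 n = (List.range n.toNat).map (fun (k : Nat) => (k : Int)) := by
  unfold PySem.List.pyRange
  norm_num
  rcases show n ≤ 0 ∨ 0 < n by omega with h | h
  · rw [if_neg (by omega)]
    have : n.toNat = 0 := by omega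
    simp [this]
  · rw [if_pos h]

theorem pyRange_down (n : Int) :
    PySem.List.pyRange (n - 1) (-1) (-1) = (List.range n.toNat).map (fun (k : Nat) => n - 1 - (k : Int)) := by
  unfold PySem.List.pyRange
  norm_num
  rcases show n ≤ 0 ∨ 0 < n by omega with h | h
  · rw [if_neg (by omega)]
    have : n.toNat = 0 := by omega
    simp [this]
  · rw [if_pos (by omega)]
    apply List.map_congr_left
    intro k _
    ring

theorem to_map_eq (n : Int) (arr : List Int) :
    to_map n arr = arr.map (fun num => (rowA n.toNat num).reverse) := by
  unfold to_map
  have hlen : (PySem.List.pyRange 0 n).length = n.toNat := by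
    rw [pyRange_len, List.length_map, List.length_range]
  rw [pv_foldl_append_map (fun num => ((PySem.List.pyRange 0 n).foldl
      (fun (st : List String × Int) _ =>
        (st.1 ++ [PySem.Int.toStr (PySem.Int.mod st.2 2)], PySem.Int.floordiv st.2 2))
      ([], num)).1.reverse) arr []]
  rw [List.nil_append]
  apply List.map_congr_left
  intro num _
  rw [pv_fold_rowA, hlen]
  simp

-- reversed-index map over range is the reverse of the map
theorem pv_map_range_rev {β : Type} (g : Nat → β) :
    ∀ m : Nat, (List.range m).map (fun k => g (m - 1 - k)) = ((List.range m).map g).reverse := by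
  intro m
  induction m with
  | zero => rfl
  | succ t ih =>
      conv_lhs => rw [List.range_succ_eq_map]
      conv_rhs => rw [List.range_succ]
      simp only [List.map_cons, List.map_append, List.map_map, List.reverse_append,
        List.map_nil, List.reverse_cons, List.reverse_nil, List.nil_append,
        List.cons_append]
      congr 1
      rw [← ih]
      apply List.map_congr_left
      intro k _
      simp only [Function.comp_apply]
      congr 1
      omega

-- zip of two reverses of equal length is the reverse of the zip
theorem pv_zip_reverse {α β : Type} :
    ∀ (l1 : List α) (l2 : List β), l1.length = l2.length →
      l1.reverse.zip l2.reverse = (l1.zip l2).reverse := by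
  intro l1
  induction l1 with
  | nil => intro l2 h; simp
  | cons x t ih =>
      intro l2 h
      cases l2 with
      | nil => simp at h
      | cons y u =>
          simp only [List.length_cons, Nat.add_right_cancel_iff] at h
          simp only [List.reverse_cons, List.zip_cons_cons, List.reverse_cons]
          rw [List.zip_append (by simp [h]), ih u h]
          simp

-- arithmetic: Python floor-div/mod and PySem.Int.bor on explicit sign shapes ---------

theorem fdiv_cast (A : Nat) : PySem.Int.floordiv (A : Int) 2 = ((A / 2 : Nat) : Int) := by
  rw [PySem.Int.floordiv_eq_ediv_of_pos (by norm_num)]; omega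

theorem fdiv_negsucc (B : Nat) : PySem.Int.floordiv (-(B : Int) - 1) 2 = -((B / 2 : Nat) : Int) - 1 := by
  rw [PySem.Int.floordiv_eq_ediv_of_pos (by norm_num)]; omega

theorem mod_cast' (A : Nat) : PySem.Int.mod (A : Int) 2 = ((A % 2 : Nat) : Int) := by
  rw [PySem.Int.mod_eq_emod_of_pos (by norm_num)]; omega

theorem mod_negsucc (B : Nat) : PySem.Int.mod (-(B : Int) - 1) 2 = 1 - ((B % 2 : Nat) : Int) := by
  rw [PySem.Int.mod_eq_emod_of_pos (by norm_num)]; omega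

theorem nat_or_mod_two (m n : Nat) : (m ||| n) % 2 = 1 ↔ (m % 2 = 1 ∨ n % 2 = 1) := by
  have h := Nat.testBit_lor m n 0
  simp only [Nat.testBit_zero, ← Bool.decide_or, decide_eq_decide] at h
  exact h

theorem nat_and_mod_two (m n : Nat) : (m &&& n) % 2 = 1 ↔ (m % 2 = 1 ∧ n % 2 = 1) := by
  have h := Nat.testBit_land m n 0
  simp only [Nat.testBit_zero, ← Bool.decide_and, decide_eq_decide] at h
  exact h

theorem nat_or_div_two (m n : Nat) : (m ||| n) / 2 = m / 2 ||| n / 2 := by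
  apply Nat.eq_of_testBit_eq
  intro i
  rw [← Nat.testBit_succ, Nat.testBit_lor, Nat.testBit_lor, ← Nat.testBit_succ, ← Nat.testBit_succ]

theorem nat_and_div_two (m n : Nat) : (m &&& n) / 2 = m / 2 &&& n / 2 := by
  apply Nat.eq_of_testBit_eq
  intro i
  rw [← Nat.testBit_succ, Nat.testBit_land, Nat.testBit_land, ← Nat.testBit_succ, ← Nat.testBit_succ]

theorem bor_nn (A B : Nat) : PySem.Int.bor (A : Int) (B : Int) = ((A ||| B : Nat) : Int) := by
  unfold PySem.Int.bor
  rw [if_pos (by positivity), if_pos (by positivity)]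
  simp

theorem bor_np (A B : Nat) : PySem.Int.bor (A : Int) (-(B : Int) - 1) = -((B - (B &&& A) : Nat) : Int) - 1 := by
  unfold PySem.Int.bor
  rw [if_pos (by positivity), if_neg (by omega)]
  have h1 : (-(-(B:Int) - 1) - 1).toNat = B := by omega
  have h2 : ((A:Int)).toNat = A := by omega
  rw [h1, h2]

theorem bor_pn (A B : Nat) : PySem.Int.bor (-(A : Int) - 1) (B : Int) = -((A - (A &&& B) : Nat) : Int) - 1 := by
  unfold PySem.Int.bor
  rw [if_neg (by omega), if_pos (by positivity)]
  have h1 : (-(-(A:Int) - 1) - 1).toNat = A := by omega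
  have h2 : ((B:Int)).toNat = B := by omega
  rw [h1, h2]

theorem bor_negneg (A B : Nat) : PySem.Int.bor (-(A : Int) - 1) (-(B : Int) - 1) = -((A &&& B : Nat) : Int) - 1 := by
  unfold PySem.Int.bor
  rw [if_neg (by omega), if_neg (by omega)]
  have h1 : (-(-(A:Int) - 1) - 1).toNat = A := by omega
  have h2 : (-(-(B:Int) - 1) - 1).toNat = B := by omega
  rw [h1, h2]

-- bit 0 of a|b is zero iff both bits are zero
theorem bor_mod_two (a b : Int) :
    PySem.Int.mod (PySem.Int.bor a b) 2 = 0 ↔ (PySem.Int.mod a 2 = 0 ∧ PySem.Int.mod b 2 = 0) := by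
  rcases show (0 ≤ a ∨ a < 0) by omega with ha | ha <;>
    rcases show (0 ≤ b ∨ b < 0) by omega with hb | hb
  · obtain ⟨A, rfl⟩ : ∃ A : Nat, a = ↑A := ⟨a.toNat, by omega⟩
    obtain ⟨B, rfl⟩ : ∃ B : Nat, b = ↑B := ⟨b.toNat, by omega⟩
    rw [bor_nn, mod_cast', mod_cast', mod_cast']
    have h := nat_or_mod_two A B
    omega
  · obtain ⟨A, rfl⟩ : ∃ A : Nat, a = ↑A := ⟨a.toNat, by omega⟩
    obtain ⟨B, rfl⟩ : ∃ B : Nat, b = -↑B - 1 := ⟨(-b-1).toNat, by omega⟩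
    rw [bor_np, mod_cast', mod_negsucc, mod_negsucc]
    have h := nat_and_mod_two B A
    have hle : B &&& A ≤ B := Nat.and_le_left
    omega
  · obtain ⟨A, rfl⟩ : ∃ A : Nat, a = -↑A - 1 := ⟨(-a-1).toNat, by omega⟩
    obtain ⟨B, rfl⟩ : ∃ B : Nat, b = ↑B := ⟨b.toNat, by omega⟩
    rw [bor_pn, mod_cast', mod_negsucc, mod_negsucc]
    have h := nat_and_mod_two A B
    have hle : A &&& B ≤ A := Nat.and_le_left
    omega
  · obtain ⟨A, rfl⟩ : ∃ A : Nat, a = -↑A - 1 := ⟨(-a-1).toNat, by omega⟩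
    obtain ⟨B, rfl⟩ : ∃ B : Nat, b = -↑B - 1 := ⟨(-b-1).toNat, by omega⟩
    rw [bor_negneg, mod_negsucc, mod_negsucc, mod_negsucc]
    have h := nat_and_mod_two A B
    omega

-- halving commutes with |
theorem bor_fdiv_two (a b : Int) :
    PySem.Int.floordiv (PySem.Int.bor a b) 2
      = PySem.Int.bor (PySem.Int.floordiv a 2) (PySem.Int.floordiv b 2) := by
  rcases show (0 ≤ a ∨ a < 0) by omega with ha | ha <;>
    rcases show (0 ≤ b ∨ b < 0) by omega with hb | hb
  · obtain ⟨A, rfl⟩ : ∃ A : Nat, a = ↑A := ⟨a.toNat, by omega⟩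
    obtain ⟨B, rfl⟩ : ∃ B : Nat, b = ↑B := ⟨b.toNat, by omega⟩
    rw [bor_nn, fdiv_cast, fdiv_cast, fdiv_cast, bor_nn, nat_or_div_two]
  · obtain ⟨A, rfl⟩ : ∃ A : Nat, a = ↑A := ⟨a.toNat, by omega⟩
    obtain ⟨B, rfl⟩ : ∃ B : Nat, b = -↑B - 1 := ⟨(-b-1).toNat, by omega⟩
    rw [bor_np, fdiv_negsucc, fdiv_cast, fdiv_negsucc, bor_np]
    have hd : (B - (B &&& A)) / 2 = B / 2 - (B / 2 &&& A / 2) := by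
      rw [← nat_and_div_two]
      have hle : B &&& A ≤ B := Nat.and_le_left
      have h := nat_and_mod_two B A
      omega
    rw [hd]
  · obtain ⟨A, rfl⟩ : ∃ A : Nat, a = -↑A - 1 := ⟨(-a-1).toNat, by omega⟩
    obtain ⟨B, rfl⟩ : ∃ B : Nat, b = ↑B := ⟨b.toNat, by omega⟩
    rw [bor_pn, fdiv_negsucc, fdiv_negsucc, fdiv_cast, bor_pn]
    have hd : (A - (A &&& B)) / 2 = A / 2 - (A / 2 &&& B / 2) := by
      rw [← nat_and_div_two]
      have hle : A &&& B ≤ A := Nat.and_le_left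
      have h := nat_and_mod_two A B
      omega
    rw [hd]
  · obtain ⟨A, rfl⟩ : ∃ A : Nat, a = -↑A - 1 := ⟨(-a-1).toNat, by omega⟩
    obtain ⟨B, rfl⟩ : ∃ B : Nat, b = -↑B - 1 := ⟨(-b-1).toNat, by omega⟩
    rw [bor_negneg, fdiv_negsucc, fdiv_negsucc, fdiv_negsucc, bor_negneg, nat_and_div_two]

theorem shiftRight_one_eq_fdiv (x : Int) : x >>> (1 : Nat) = PySem.Int.floordiv x 2 := by
  rw [Int.shiftRight_eq_div_pow, PySem.Int.floordiv_eq_ediv_of_pos (by norm_num)]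
  norm_num

-- int(str(d)) roundtrip for a digit of A
theorem digit_roundtrip (x : Int) :
    (PySem.Int.ofStr? (PySem.Int.toStr (PySem.Int.mod x 2))).getD 0 = PySem.Int.mod x 2 := by
  rcases PySem.Int.mod_two_eq x with h | h <;> rw [h] <;> decide

-- the combined LSB-first character list, A style
def lsbA : Nat → Int → Int → List String
  | 0, _, _ => []
  | m + 1, a, b =>
      (if ((PySem.Int.ofStr? (PySem.Int.toStr (PySem.Int.mod a 2))).getD 0
           + (PySem.Int.ofStr? (PySem.Int.toStr (PySem.Int.mod b 2))).getD 0) ≠ 0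
       then "#" else " ")
        :: lsbA m (PySem.Int.floordiv a 2) (PySem.Int.floordiv b 2)

theorem lsbA_core : ∀ (m : Nat) (a b : Int),
    lsbA m a b
      = (List.range m).map (fun (i : Nat) =>
          if PySem.Int.band (PySem.Int.bor a b >>> i) 1 ≠ 0 then "#" else " ") := by
  intro m
  induction m with
  | zero => intro a b; rfl
  | succ t ih =>
      intro a b
      rw [List.range_succ_eq_map, List.map_cons, List.map_map]
      show lsbA (t + 1) a b = _
      rw [lsbA]
      congr 1
      · rw [digit_roundtrip, digit_roundtrip, Int.shiftRight_zero, PySem.Int.band_one]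
        have h := bor_mod_two a b
        rcases PySem.Int.mod_two_eq a with h1 | h1 <;>
          rcases PySem.Int.mod_two_eq b with h2 | h2 <;>
          rcases PySem.Int.mod_two_eq (PySem.Int.bor a b) with h3 | h3 <;>
          rw [h1, h2] <;> split_ifs with c1 c2 <;> first | rfl | omega
      · rw [ih]
        apply List.map_congr_left
        intro k _
        simp only [Function.comp_apply]
        have : PySem.Int.bor a b >>> (k + 1) = PySem.Int.bor (PySem.Int.floordiv a 2) (PySem.Int.floordiv b 2) >>> k := by
          rw [show k + 1 = 1 + k from by omega, Int.shiftRight_add, shiftRight_one_eq_fdiv, bor_fdiv_two]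
        rw [this]

theorem lsbA_zipspec : ∀ (m : Nat) (a b : Int),
    ((rowA m a).zip (rowA m b)).map (fun q =>
        if ([q.1, q.2].foldl (fun s t => s + (PySem.Int.ofStr? t).getD 0) 0) ≠ 0
        then "#" else " ")
      = lsbA m a b := by
  intro m
  induction m with
  | zero => intro a b; rfl
  | succ t ih =>
      intro a b
      rw [show rowA (t+1) a = PySem.Int.toStr (PySem.Int.mod a 2) :: rowA t (PySem.Int.floordiv a 2) from rfl,
          show rowA (t+1) b = PySem.Int.toStr (PySem.Int.mod b 2) :: rowA t (PySem.Int.floordiv b 2) from rfl,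
          List.zip_cons_cons, List.map_cons, ih]
      rw [lsbA]
      congr 1
      simp [List.foldl]

-- per-pair equality of the rendered rows
theorem row_eq (n : Int) (a b : Int) :
    PySem.Str.join "" (((rowA n.toNat a).reverse.zip (rowA n.toNat b).reverse).map (fun q =>
        if ([q.1, q.2].foldl (fun s t => s + (PySem.Int.ofStr? t).getD 0) 0) ≠ 0
        then "#" else " "))
      = PySem.Str.join "" ((PySem.List.pyRange (n - 1) (-1) (-1)).map (fun k =>
          if PySem.Int.band (PySem.Int.bor a b >>> k.toNat) 1 ≠ 0 then "#" else " ")) := by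
  have hz : (rowA n.toNat a).reverse.zip (rowA n.toNat b).reverse
      = ((rowA n.toNat a).zip (rowA n.toNat b)).reverse :=
    pv_zip_reverse _ _ (by rw [rowA_length, rowA_length])
  rw [hz, List.map_reverse, lsbA_zipspec, lsbA_core]
  rw [pyRange_down, List.map_map]
  congr 1
  rw [← pv_map_range_rev (fun (i : Nat) => if PySem.Int.band (PySem.Int.bor a b >>> i) 1 ≠ 0 then "#" else " ") n.toNat]
  apply List.map_congr_left
  intro k hk
  simp only [Function.comp_apply]
  have hk' : k < n.toNat := List.mem_range.mp hk
  have : (n - 1 - (k : Int)).toNat = n.toNat - 1 - k := by omega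
  rw [this, Int.shiftRight_natCast_right]

-- ===== VERDICT (by name: the statement is the Claim_ definition above) =====
theorem solution_spec : Claim_equal_solution := by
  intro n arr1 arr2 _
  unfold Spec_solution solution solution_alt
  dsimp only []
  rw [to_map_eq, to_map_eq, List.zip_map]
  rw [pv_foldl_append_map (fun (p : List String × List String) => PySem.Str.join ""
        ((p.1.zip p.2).foldl (fun nr q =>
          nr ++ [if ([q.1, q.2].foldl (fun s t => s + (PySem.Int.ofStr? t).getD 0) 0) ≠ 0
                 then "#" else " "]) []))
      ((arr1.zip arr2).map (Prod.map (fun num => (rowA n.toNat num).reverse) (fun num => (rowA n.toNat num).reverse))) []]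
  rw [List.nil_append, List.map_map]
  apply List.map_congr_left
  intro p _
  obtain ⟨a, b⟩ := p
  simp only [Function.comp_apply, Prod.map_apply]
  rw [pv_foldl_append_map (fun (q : String × String) =>
        if ([q.1, q.2].foldl (fun s t => s + (PySem.Int.ofStr? t).getD 0) 0) ≠ 0
        then "#" else " ") _ []]
  rw [List.nil_append]
  exact row_eq n a b
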